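-- pv_equiv track=rewrite | github.com/The-Harsh-Vardhan/TIDAL-Tampered_Image_Detection_And_Localization | Notebooks/tracks/v0x/documentation_experiments/Approach_5_FakeShield/Fakeshield Lite/_build_v3.0.py | _to_lines
-- ===== SOURCE A (Python) =====
-- def _to_lines(s: str):
--     """Convert multi-line string to Jupyter cell source format (list of lines)."""
--     lines = s.split("\n")
--     out = []
--     for i, line in enumerate(lines):
--         if i < len(lines) - 1:
--             out.append(line + "\n")
--         else:
--             out.append(line)
--     return out
-- ===== SOURCE B (Python) =====
-- def _to_lines(s: str):
--     """Convert multi-line string to Jupyter cell source format (list of lines)."""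
--     out = []
--     cur = []
--     for ch in s:
--         cur.append(ch)
--         if ch == "\n":
--             out.append("".join(cur))
--             cur = []
--     out.append("".join(cur))
--     return out
-- ===== Notes on version B (the rewrite author's own statement) =====
-- stated objective: alternative
-- what changed: B makes a single character scan that flushes the current line buffer at each newline character, instead of A's split-on-newline pass followed by an enumerate loop that re-appends the separator to every piece but the last.
import Mathlib
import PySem

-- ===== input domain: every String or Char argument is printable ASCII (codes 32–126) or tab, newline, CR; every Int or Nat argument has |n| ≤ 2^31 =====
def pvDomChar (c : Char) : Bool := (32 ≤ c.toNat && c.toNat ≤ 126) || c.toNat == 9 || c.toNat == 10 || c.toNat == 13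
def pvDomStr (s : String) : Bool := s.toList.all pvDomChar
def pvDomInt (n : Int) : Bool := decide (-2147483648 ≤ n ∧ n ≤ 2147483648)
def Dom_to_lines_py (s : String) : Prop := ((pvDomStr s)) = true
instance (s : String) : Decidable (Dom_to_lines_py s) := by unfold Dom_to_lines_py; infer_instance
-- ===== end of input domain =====

-- B replaces A's split-then-enumerate pass by a single character scan flushing the line buffer
-- at each newline (alternative decomposition; same asymptotic cost).

-- ===== PORT A =====
-- s.split("\n") then for i, line in enumerate(lines): append line+"\n" except on the last.
def to_lines_py (s : String) : List String :=
  let lines := PySem.Chars.splitOn s.toList ['\n']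
  (PySem.List.enumerate lines).foldl
    (fun out p =>
      if p.1 < (lines.length : Int) - 1 then out ++ [String.ofList (p.2 ++ ['\n'])]
      else out ++ [String.ofList p.2]) []

-- ===== PORT B =====
-- Source B's loop: cur collects chars of the current line; a newline flushes cur into out.
def toLinesScan : List Char → List Char → List String → List String
  | [], cur, out => out ++ [String.ofList cur]
  | c :: r, cur, out =>
      if c = '\n' then toLinesScan r [] (out ++ [String.ofList (cur ++ [c])])
      else toLinesScan r (cur ++ [c]) out

def to_lines_py_alt (s : String) : List String := toLinesScan s.toList [] []

-- ===== PRECONDITION & SPEC =====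
def Spec_to_lines_py (s : String) (out : List String) : Prop := out = to_lines_py_alt s
instance (s : String) (out : List String) : Decidable (Spec_to_lines_py s out) := by unfold Spec_to_lines_py; infer_instance

-- ===== CLAIM (what is proved, stated in full; the proofs are below) =====
def Claim_equal_to_lines_py : Prop := ∀ (s : String), Dom_to_lines_py s → Spec_to_lines_py s (to_lines_py s)

-- ===== LEMMAS AND PROOFS =====

-- Simple structural split on '\n' (cur kept in order), the common midpoint of both ports.
def splitAux : List Char → List Char → List (List Char)
  | [], cur => [cur]
  | c :: r, cur => if c = '\n' then cur :: splitAux r [] else splitAux r (cur ++ [c])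

-- Append '\n' to every piece but the last, and stringify.
def markLast : List (List Char) → List String
  | [] => []
  | [x] => [String.ofList x]
  | x :: y :: t => String.ofList (x ++ ['\n']) :: markLast (y :: t)

theorem splitAux_ne_nil (l cur : List Char) : splitAux l cur ≠ [] := by
  induction l generalizing cur with
  | nil => simp [splitAux]
  | cons c r ih =>
    simp only [splitAux]
    split_ifs <;> simp [ih]

theorem markLast_cons (x : List Char) (xs : List (List Char)) (h : xs ≠ []) :
    markLast (x :: xs) = String.ofList (x ++ ['\n']) :: markLast xs := by
  cases xs with
  | nil => exact absurd rfl h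
  | cons y t => rfl

theorem splitOn_go_eq (l : List Char) : ∀ (fuel : Nat) (cur : List Char)
    (acc : List (List Char)), l.length ≤ fuel →
    PySem.Chars.splitOn.go ['\n'] fuel l cur acc = acc.reverse ++ splitAux l cur.reverse := by
  induction l with
  | nil =>
    intro fuel cur acc _
    cases fuel <;> simp [PySem.Chars.splitOn.go, splitAux]
  | cons c r ih =>
    intro fuel cur acc hf
    cases fuel with
    | zero => simp at hf
    | succ f =>
      simp only [PySem.Chars.splitOn.go]
      by_cases hc : c = '\n'
      · subst hc
        simp only [List.isPrefixOf]
        rw [if_pos (by decide)]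
        simp only [List.length_cons, List.length_nil, List.drop_succ_cons, List.drop_zero]
        rw [ih f [] (cur.reverse :: acc) (by simpa using Nat.lt_succ_iff.mp (by simpa using hf))]
        simp [splitAux]
      · have hpre : (['\n'].isPrefixOf (c :: r)) = false := by
          simp [List.isPrefixOf, BEq.beq]
          intro h; exact absurd h.symm hc
        rw [hpre]
        simp only [Bool.false_eq_true, if_false]
        rw [ih f (c :: cur) acc (by simpa using Nat.lt_succ_iff.mp (by simpa using hf))]
        simp [splitAux, hc]

theorem splitOn_eq (l : List Char) :
    PySem.Chars.splitOn l ['\n'] = splitAux l [] := by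
  have := splitOn_go_eq l (l.length + 1) [] [] (Nat.le_succ _)
  simpa [PySem.Chars.splitOn] using this

theorem foldl_enum_eq (lines : List (List Char)) : ∀ (k n : Int) (out : List String),
    k + lines.length = n →
    (PySem.List.enumerate lines k).foldl
      (fun out p =>
        if p.1 < n - 1 then out ++ [String.ofList (p.2 ++ ['\n'])]
        else out ++ [String.ofList p.2]) out = out ++ markLast lines := by
  induction lines with
  | nil => intro k n out _; simp [PySem.List.enumerate, markLast]
  | cons x rest ih =>
    intro k n out hn
    simp only [PySem.List.enumerate, List.foldl_cons]
    cases rest with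
    | nil =>
      have hk : ¬ ((k : Int) < n - 1) := by
        simp [List.length_cons] at hn; omega
      simp [hk, PySem.List.enumerate, markLast]
    | cons y t =>
      have hk : (k : Int) < n - 1 := by
        simp [List.length_cons] at hn; push_cast at hn ⊢; omega
      rw [if_pos hk, ih (k + 1) n _ (by simp at hn ⊢; push_cast at hn ⊢; omega)]
      rw [markLast_cons x (y :: t) (by simp)]
      simp

theorem toLinesScan_eq (l : List Char) : ∀ (cur : List Char) (out : List String),
    toLinesScan l cur out = out ++ markLast (splitAux l cur) := by
  induction l with
  | nil => intro cur out; simp [toLinesScan, splitAux, markLast]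
  | cons c r ih =>
    intro cur out
    by_cases hc : c = '\n'
    · subst hc
      simp only [toLinesScan, splitAux, if_true, ite_true, reduceIte]
      rw [ih [] (out ++ [String.ofList (cur ++ ['\n'])]),
        markLast_cons cur (splitAux r []) (splitAux_ne_nil r [])]
      simp
    · simp only [toLinesScan, splitAux, if_neg hc]
      exact ih (cur ++ [c]) out

-- ===== VERDICT (by name: the statement is the Claim_ definition above) =====
theorem to_lines_py_spec : Claim_equal_to_lines_py := by
  intro s _
  unfold Spec_to_lines_py to_lines_py to_lines_py_alt
  rw [splitOn_eq, toLinesScan_eq]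
  rw [foldl_enum_eq (splitAux s.toList []) 0 ((splitAux s.toList []).length : Int) []
    (by simp)]
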